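-- pv_equiv track=rewrite | github.com/rohailamalik/SysMLv2-repair-with-KG-SLMs | patching.py | _find_sublist
-- ===== SOURCE A (Python) =====
-- from typing import List, Dict, Optional
--
-- def _strip_lines(lines: List[str]) -> List[str]:
--     """Remove leading and trailing whitespace from each line."""
--     return [line.strip() for line in lines]
--
-- def _find_sublist(haystack: List[str], needle: List[str]) -> int:
--     """Find needle in haystack, ignoring leading/trailing whitespace on each line."""
--     if not needle:
--         return -1
--
--     # Strip whitespace for comparison
--     needle_stripped = _strip_lines(needle)
--     haystack_stripped = _strip_lines(haystack)
--
--     needle_len = len(needle)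
--     haystack_len = len(haystack)
--
--     # Early exit if needle is longer than haystack
--     if needle_len > haystack_len:
--         return -1
--
--     for i in range(haystack_len - needle_len + 1):
--         if haystack_stripped[i : i + needle_len] == needle_stripped:
--             return i
--
--     return -1
-- ===== SOURCE B (Python) =====
-- from typing import List
--
-- # Rabin-Karp: hash each stripped line once, slide a rolling window hash over the
-- # haystack, and verify a full (stripped) comparison only on a hash hit.
--
-- _BASE = 1000003
-- _MOD = 2305843009213693951  # 2^61 - 1
--
-- def _line_hash(line: str) -> int:
--     h = 1
--     for ch in line.strip():
--         h = (h * _BASE + ord(ch)) % _MOD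
--     return h
--
-- def _find_sublist(haystack: List[str], needle: List[str]) -> int:
--     if not needle:
--         return -1
--     m = len(needle)
--     n = len(haystack)
--     if m > n:
--         return -1
--     nh = [_line_hash(line) for line in needle]
--     hh = [_line_hash(line) for line in haystack]
--     ns = [line.strip() for line in needle]
--     hs = [line.strip() for line in haystack]
--     target = 0
--     for v in nh:
--         target = (target * _BASE + v) % _MOD
--     cur = 0
--     for v in hh[:m]:
--         cur = (cur * _BASE + v) % _MOD
--     powm = pow(_BASE, m, _MOD)
--     for i in range(n - m + 1):
--         if cur == target and hs[i:i + m] == ns: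
--             return i
--         if i + m < n:
--             cur = (cur * _BASE + hh[i + m] - powm * hh[i]) % _MOD
--     return -1
-- ===== Notes on version B (the rewrite author's own statement) =====
-- stated objective: alternative
-- what changed: Replaces A's per-window slice comparison with a Rabin-Karp rolling hash over the stripped line sequence, doing the full window comparison only on a hash hit.
import Mathlib
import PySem

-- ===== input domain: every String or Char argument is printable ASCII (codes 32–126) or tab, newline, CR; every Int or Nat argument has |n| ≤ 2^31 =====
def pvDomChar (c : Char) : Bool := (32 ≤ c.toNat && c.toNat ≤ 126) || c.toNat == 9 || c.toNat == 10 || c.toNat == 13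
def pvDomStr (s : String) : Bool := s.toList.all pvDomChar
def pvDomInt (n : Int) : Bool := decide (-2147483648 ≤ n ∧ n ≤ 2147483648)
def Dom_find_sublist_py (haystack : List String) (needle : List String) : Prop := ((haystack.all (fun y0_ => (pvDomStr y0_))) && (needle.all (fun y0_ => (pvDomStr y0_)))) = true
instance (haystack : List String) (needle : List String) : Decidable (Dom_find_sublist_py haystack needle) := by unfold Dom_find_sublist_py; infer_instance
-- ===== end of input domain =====

-- B replaces A's slice-compare at every window by a Rabin–Karp rolling hash over the
-- stripped lines, verifying with a full comparison only on a hash hit (objective: alternative).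

-- ===== PORT A =====
-- _strip_lines
def strip_lines_py (lines : List String) : List String :=
  lines.map (fun line => PySem.Str.strip line)

-- the 'for i in range(...)' loop of A with its early return
def pvALoop (hs ns : List String) (m : Int) : List Int → Int
  | [] => -1
  | i :: rest =>
    if PySem.List.slice hs (some i) (some (i + m)) = ns then i
    else pvALoop hs ns m rest

def find_sublist_py (haystack : List String) (needle : List String) : Int :=
  if needle = [] then -1
  else
    let needle_stripped := strip_lines_py needle
    let haystack_stripped := strip_lines_py haystack
    let needle_len : Int := PySem.List.len needle
    let haystack_len : Int := PySem.List.len haystack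
    if needle_len > haystack_len then -1
    else
      pvALoop haystack_stripped needle_stripped needle_len
        (PySem.List.pyRange 0 (haystack_len - needle_len + 1) 1)

-- ===== PORT B =====
def pvB : Int := 1000003
def pvP : Int := 2305843009213693951

-- _line_hash: h = 1; for ch in line.strip(): h = (h*BASE + ord(ch)) % MOD
def pvCharsHash (cs : List Char) : Int :=
  cs.foldl (fun h c => PySem.Int.mod (h * pvB + (c.toNat : Int)) pvP) 1

def pvLineHash (line : String) : Int :=
  pvCharsHash (PySem.Str.strip line).toList

-- the two accumulation loops 'for v in l: acc = (acc*BASE + v) % MOD'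
def pvWHash (l : List Int) : Int :=
  l.foldl (fun h v => PySem.Int.mod (h * pvB + v) pvP) 0

-- the main 'for i in range(n-m+1)' loop of B, carrying the rolling hash cur
def pvBLoop (hs ns : List String) (hh : List Int) (m n target powm : Int)
    (cur : Int) : List Int → Int
  | [] => -1
  | i :: rest =>
    if cur = target ∧ PySem.List.slice hs (some i) (some (i + m)) = ns then i
    else
      let cur' :=
        if i + m < n then
          PySem.Int.mod
            (cur * pvB + PySem.List.pyGetD hh (i + m) 0 - powm * PySem.List.pyGetD hh i 0) pvP
        else cur
      pvBLoop hs ns hh m n target powm cur' rest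

def find_sublist_py_alt (haystack : List String) (needle : List String) : Int :=
  if needle = [] then -1
  else
    let m : Int := PySem.List.len needle
    let n : Int := PySem.List.len haystack
    if m > n then -1
    else
      let nh := needle.map pvLineHash
      let hh := haystack.map pvLineHash
      let ns := needle.map (fun line => PySem.Str.strip line)
      let hs := haystack.map (fun line => PySem.Str.strip line)
      let target := pvWHash nh
      let cur := pvWHash (PySem.List.slice hh (some 0) (some m))
      let powm := PySem.Int.powMod pvB m.toNat pvP
      pvBLoop hs ns hh m n target powm cur (PySem.List.pyRange 0 (n - m + 1) 1)

-- ===== PRECONDITION & SPEC =====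
def Spec_find_sublist_py (haystack : List String) (needle : List String) (out : Int) : Prop := out = find_sublist_py_alt haystack needle
instance (haystack : List String) (needle : List String) (out : Int) : Decidable (Spec_find_sublist_py haystack needle out) := by unfold Spec_find_sublist_py; infer_instance

-- ===== CLAIM (what is proved, stated in full; the proofs are below) =====
def Claim_equal_find_sublist_py : Prop := ∀ (haystack : List String) (needle : List String), Dom_find_sublist_py haystack needle → Spec_find_sublist_py haystack needle (find_sublist_py haystack needle)

-- ===== LEMMAS AND PROOFS =====
def pvPn : Nat := 2305843009213693951

theorem pvP_pos : (0 : Int) < pvP := by norm_num [pvP]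

theorem pvP_cast : pvP = ((pvPn : Nat) : Int) := by norm_num [pvP, pvPn]

-- casting one hashing step into ZMod pvPn kills the mod
theorem pvCastStep (h v : Int) :
    ((PySem.Int.mod (h * pvB + v) pvP : Int) : ZMod pvPn) = (h : ZMod pvPn) * (pvB : ZMod pvPn) + (v : ZMod pvPn) := by
  rw [PySem.Int.mod_eq_emod_of_pos pvP_pos, pvP_cast, ZMod.intCast_mod]
  push_cast
  ring

-- cast of the accumulation fold, from any start value
theorem pvCastFold (l : List Int) (h : Int) :
    ((l.foldl (fun h v => PySem.Int.mod (h * pvB + v) pvP) h : Int) : ZMod pvPn)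
      = (l.map (fun v : Int => (v : ZMod pvPn))).foldl
          (fun a v => a * (pvB : ZMod pvPn) + v) ((h : Int) : ZMod pvPn) := by
  induction l generalizing h with
  | nil => rfl
  | cons x xs ih => simp only [List.foldl_cons, List.map_cons, ih, pvCastStep]

-- pull the start value out of the ZMod fold
theorem pvFoldShift (l : List (ZMod pvPn)) (h : ZMod pvPn) :
    l.foldl (fun a v => a * (pvB : ZMod pvPn) + v) h
      = h * (pvB : ZMod pvPn) ^ l.length
        + l.foldl (fun a v => a * (pvB : ZMod pvPn) + v) 0 := by
  induction l generalizing h with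
  | nil => simp
  | cons x xs ih =>
    simp only [List.foldl_cons, List.length_cons]
    rw [ih (h * _ + x), ih (0 * _ + x)]
    ring

-- two canonical residues that agree in ZMod pvPn are equal
theorem pvResidueEq {x y : Int} (hx0 : 0 ≤ x) (hx1 : x < pvP) (hy0 : 0 ≤ y) (hy1 : y < pvP)
    (h : ((x : Int) : ZMod pvPn) = y) : x = y := by
  rw [ZMod.intCast_eq_intCast_iff'] at h
  rwa [Int.emod_eq_of_lt hx0 (by rw [← pvP_cast]; exact hx1),
       Int.emod_eq_of_lt hy0 (by rw [← pvP_cast]; exact hy1)] at h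

theorem pvWHash_append_singleton (t : List Int) (v : Int) :
    pvWHash (t ++ [v]) = PySem.Int.mod (pvWHash t * pvB + v) pvP := by
  unfold pvWHash
  rw [List.foldl_append]
  rfl

-- the rolling-hash update is exact
theorem pvRoll (a v : Int) (t : List Int) :
    PySem.Int.mod
        (pvWHash (a :: t) * pvB + v - PySem.Int.powMod pvB (t.length + 1) pvP * a) pvP
      = pvWHash (t ++ [v]) := by
  rw [pvWHash_append_singleton]
  refine pvResidueEq (PySem.Int.mod_nonneg _ pvP_pos) (PySem.Int.mod_lt _ pvP_pos)
    (PySem.Int.mod_nonneg _ pvP_pos) (PySem.Int.mod_lt _ pvP_pos) ?_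
  rw [PySem.Int.mod_eq_emod_of_pos pvP_pos, PySem.Int.mod_eq_emod_of_pos pvP_pos,
      pvP_cast, ZMod.intCast_mod, ZMod.intCast_mod]
  have hcons : ((pvWHash (a :: t) : Int) : ZMod pvPn)
      = (a : ZMod pvPn) * (pvB : ZMod pvPn) ^ t.length
        + (t.map (fun v : Int => (v : ZMod pvPn))).foldl
            (fun x w => x * (pvB : ZMod pvPn) + w) 0 := by
    have h1 : pvWHash (a :: t)
        = t.foldl (fun h v => PySem.Int.mod (h * pvB + v) pvP)
            (PySem.Int.mod (0 * pvB + a) pvP) := rfl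
    rw [h1, pvCastFold, pvCastStep]
    rw [pvFoldShift, List.length_map]
    push_cast
    ring
  have hpow : ((PySem.Int.powMod pvB (t.length + 1) ((pvPn : Nat) : Int) : Int) : ZMod pvPn)
      = (pvB : ZMod pvPn) ^ (t.length + 1) := by
    unfold PySem.Int.powMod
    rw [PySem.Int.mod_eq_emod_of_pos (by rw [← pvP_cast]; exact pvP_pos), ZMod.intCast_mod]
    push_cast
    ring
  have ht : ((pvWHash t : Int) : ZMod pvPn)
      = (t.map (fun v : Int => (v : ZMod pvPn))).foldl
          (fun x w => x * (pvB : ZMod pvPn) + w) 0 := by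
    have h2 : pvWHash t = t.foldl (fun h v => PySem.Int.mod (h * pvB + v) pvP) 0 := rfl
    rw [h2, pvCastFold]; norm_num
  push_cast
  rw [hcons, hpow, ht]
  ring

-- equal stripped windows have equal line hashes (hash completeness)
theorem pvHashCongr {u v : List String}
    (h : u.map (fun line => PySem.Str.strip line) = v.map (fun line => PySem.Str.strip line)) :
    u.map pvLineHash = v.map pvLineHash := by
  have hu : u.map pvLineHash
      = (u.map (fun line => PySem.Str.strip line)).map (fun s => pvCharsHash s.toList) := by
    rw [List.map_map]; rfl
  have hv : v.map pvLineHash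
      = (v.map (fun line => PySem.Str.strip line)).map (fun s => pvCharsHash s.toList) := by
    rw [List.map_map]; rfl
  rw [hu, hv, h]

-- main loop lemma: both scans agree, given the rolling-hash invariant
theorem pvLoopEq (haystack needle : List String)
    (hpos : 0 < needle.length) (hle : needle.length ≤ haystack.length) :
    ∀ (k i : Nat), i + k = haystack.length - needle.length + 1 →
      pvBLoop (haystack.map (fun line => PySem.Str.strip line))
          (needle.map (fun line => PySem.Str.strip line))
          (haystack.map pvLineHash)
          (needle.length) (haystack.length)
          (pvWHash (needle.map pvLineHash))
          (PySem.Int.powMod pvB needle.length pvP)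
          (pvWHash (((haystack.map pvLineHash).drop i).take needle.length))
          (PySem.List.pyRange (i : Int) ((haystack.length : Int) - needle.length + 1) 1)
        = pvALoop (haystack.map (fun line => PySem.Str.strip line))
            (needle.map (fun line => PySem.Str.strip line)) (needle.length)
            (PySem.List.pyRange (i : Int) ((haystack.length : Int) - needle.length + 1) 1) := by
  intro k
  induction k with
  | zero =>
    intro i hik
    have hnil : PySem.List.pyRange (i : Int) ((haystack.length : Int) - needle.length + 1) 1 = [] := by
      apply PySem.List.pyRange_one_eq_nil
      omega
    rw [hnil]
    simp [pvBLoop, pvALoop]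
  | succ k ih =>
    intro i hik
    have hiK : (i : Int) < (haystack.length : Int) - needle.length + 1 := by
      omega
    rw [PySem.List.pyRange_one_cons hiK]
    simp only [pvBLoop, pvALoop]
    have hsd : PySem.List.slice (haystack.map (fun line => PySem.Str.strip line))
        (some (i : Int)) (some ((i : Int) + (needle.length : Int)))
        = (((haystack.map (fun line => PySem.Str.strip line)).drop i).take needle.length) :=
      PySem.List.slice_natCast_add _ i needle.length
    by_cases hmatch : (((haystack.map (fun line => PySem.Str.strip line)).drop i).take needle.length)
        = needle.map (fun line => PySem.Str.strip line)
    · -- window matches: both loops return i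
      have hstripwin : ((haystack.drop i).take needle.length).map (fun line => PySem.Str.strip line)
          = needle.map (fun line => PySem.Str.strip line) := by
        rw [List.map_take, List.map_drop]; exact hmatch
      have hcur : pvWHash (((haystack.map pvLineHash).drop i).take needle.length)
          = pvWHash (needle.map pvLineHash) := by
        have h1 : ((haystack.map pvLineHash).drop i).take needle.length
            = ((haystack.drop i).take needle.length).map pvLineHash := by
          rw [List.map_take, List.map_drop]
        rw [h1, pvHashCongr hstripwin]
      simp only [hsd]
      rw [if_pos ⟨hcur, hmatch⟩, if_pos hmatch]
    · -- no match: both loops recurse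
      simp only [hsd]
      conv_rhs => rw [if_neg hmatch]
      rw [if_neg (fun h => hmatch h.2)]
      rcases Nat.eq_zero_or_pos k with hk0 | hkpos
      · -- last index: the remaining range is empty, both loops return -1
        have hnil : PySem.List.pyRange ((i : Int) + 1) ((haystack.length : Int) - needle.length + 1) 1 = [] := by
          apply PySem.List.pyRange_one_eq_nil
          omega
        rw [hnil]
        simp [pvBLoop, pvALoop]
      · -- roll the hash to the next window and use the induction hypothesis
        have hhlen : (haystack.map pvLineHash).length = haystack.length := by simp
        have hiN : i + needle.length < haystack.length := by omega
        have hiN' : i < haystack.length := by omega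
        have hif : ((i : Int) + (needle.length : Int) < (haystack.length : Int)) := by
          omega
        rw [if_pos hif]
        have hget1 : PySem.List.pyGetD (haystack.map pvLineHash) ((i : Int) + (needle.length : Int)) 0
            = (haystack.map pvLineHash)[i + needle.length] := by
          rw [show ((i : Int) + (needle.length : Int)) = ((i + needle.length : Nat) : Int) by push_cast; ring,
              PySem.List.pyGetD_natCast, List.getD_eq_getElem _ _ (by omega)]

        have hget2 : PySem.List.pyGetD (haystack.map pvLineHash) ((i : Int)) 0
            = (haystack.map pvLineHash)[i] := by
          rw [PySem.List.pyGetD_natCast, List.getD_eq_getElem _ _ (by rw [hhlen]; omega)]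
        have hwin : ((haystack.map pvLineHash).drop i).take needle.length
            = (haystack.map pvLineHash)[i]
              :: (((haystack.map pvLineHash).drop (i + 1)).take (needle.length - 1)) := by
          rw [List.drop_eq_getElem_cons (by rw [hhlen]; omega)]
          conv_lhs => rw [show needle.length = (needle.length - 1) + 1 from by omega]
          rw [List.take_succ_cons]
        have htlen : (((haystack.map pvLineHash).drop (i + 1)).take (needle.length - 1)).length
            = needle.length - 1 := by
          simp [List.length_take, List.length_drop]
          omega
        have hwin2 : ((haystack.map pvLineHash).drop (i + 1)).take needle.length
            = (((haystack.map pvLineHash).drop (i + 1)).take (needle.length - 1))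
              ++ [(haystack.map pvLineHash)[i + needle.length]] := by
          conv_lhs => rw [show needle.length = (needle.length - 1) + 1 from by omega, List.take_add_one]
          congr 1
          rw [List.getElem?_drop,
              show i + 1 + (needle.length - 1) = i + needle.length from by omega,
              List.getElem?_eq_getElem (by rw [hhlen]; omega)]
          rfl
        have hroll := pvRoll ((haystack.map pvLineHash)[i])
          ((haystack.map pvLineHash)[i + needle.length])
          (((haystack.map pvLineHash).drop (i + 1)).take (needle.length - 1))
        rw [htlen, show needle.length - 1 + 1 = needle.length by omega] at hroll
        have hcur' : PySem.Int.mod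
            (pvWHash (((haystack.map pvLineHash).drop i).take needle.length) * pvB
              + PySem.List.pyGetD (haystack.map pvLineHash) ((i : Int) + (needle.length : Int)) 0
              - PySem.Int.powMod pvB needle.length pvP
                * PySem.List.pyGetD (haystack.map pvLineHash) ((i : Int)) 0) pvP
            = pvWHash (((haystack.map pvLineHash).drop (i + 1)).take needle.length) := by
          rw [hget1, hget2, hwin, hwin2]
          exact hroll
        rw [hcur']
        have := ih (i + 1) (by omega)
        rw [show ((i + 1 : Nat) : Int) = (i : Int) + 1 by push_cast; ring] at this
        exact this

-- ===== VERDICT (by name: the statement is the Claim_ definition above) =====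
theorem find_sublist_py_spec : Claim_equal_find_sublist_py := by
  unfold Claim_equal_find_sublist_py
  intro haystack needle _
  unfold Spec_find_sublist_py find_sublist_py find_sublist_py_alt strip_lines_py
  by_cases h0 : needle = []
  · simp [h0]
  · rw [if_neg h0, if_neg h0]
    simp only [PySem.List.len_eq]
    by_cases hlen : (needle.length : Int) > (haystack.length : Int)
    · rw [if_pos hlen, if_pos hlen]
    · rw [if_neg hlen, if_neg hlen]
      have hle : needle.length ≤ haystack.length := by exact_mod_cast not_lt.mp hlen
      have hpos : 0 < needle.length := List.length_pos_iff.mpr h0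
      have hcur0 : PySem.List.slice (haystack.map pvLineHash) (some 0) (some (needle.length : Int))
          = ((haystack.map pvLineHash).drop 0).take needle.length := by
        rw [PySem.List.slice_zero_start, PySem.List.slice_to _ (by positivity)]
        simp
      rw [hcur0, show ((needle.length : Int)).toNat = needle.length from Int.toNat_natCast _]
      have := pvLoopEq haystack needle hpos hle (haystack.length - needle.length + 1) 0 (by omega)
      rw [show ((0 : Nat) : Int) = 0 from rfl] at this
      exact this.symm
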